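-- pv_equiv track=rewrite | github.com/BoundlessFate/SnakeAI | snake_ai_rev_02.py | createHamiltonian
-- ===== SOURCE A (Python) =====
-- def createHamiltonian(boardSize):
--     # Create Board Of All Zeroes
--     board = []
--     for i in range(boardSize):
--         board.append([])
--         for j in range(boardSize):
--             board[i].append(0)
--     # Top Left = 1
--     board[0][0] = 1
--     count = 2
--     # Go up and down the rows excluding the first row and increment
--     # Looping through columns
--     for i in range(len(board)):
--         # if going down
--         if i % 2 == 0:
--             for j in range(1, len(board)):
--                 board[j][i] = count
--                 count += 1
--         # if going up
--         else:
--             for j in range(len(board) -1, 0, -1):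
--                 board[j][i] = count
--                 count += 1
--     # Increment the rest of the top row excluding the top left
--     for i in range(len(board[0]) - 1, 0, -1):
--         board[0][i] = count
--         count += 1
--     return board
-- ===== SOURCE B (Python) =====
-- def createHamiltonian(boardSize):
--     # Each cell's number comes directly from its coordinates (closed-form serpentine
--     # numbering); no zero board, no mutation, no running counter.
--     n = boardSize
--     return [[(1 if c == 0 else n * n - c + 1) if r == 0
--              else (2 + c * (n - 1) + (r - 1) if c % 2 == 0
--                    else 2 + c * (n - 1) + (n - 1 - r))
--              for c in range(n)]
--             for r in range(n)]
-- ===== Notes on version B (the rewrite author's own statement) =====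
-- stated objective: alternative
-- what changed: B replaces the sequential serpentine counter fill (zero board mutated by three counter-threading loops) with a single comprehension that computes each cell's number directly from its coordinates by a closed-form parity formula; no board mutation and no running counter.
import Mathlib
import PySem

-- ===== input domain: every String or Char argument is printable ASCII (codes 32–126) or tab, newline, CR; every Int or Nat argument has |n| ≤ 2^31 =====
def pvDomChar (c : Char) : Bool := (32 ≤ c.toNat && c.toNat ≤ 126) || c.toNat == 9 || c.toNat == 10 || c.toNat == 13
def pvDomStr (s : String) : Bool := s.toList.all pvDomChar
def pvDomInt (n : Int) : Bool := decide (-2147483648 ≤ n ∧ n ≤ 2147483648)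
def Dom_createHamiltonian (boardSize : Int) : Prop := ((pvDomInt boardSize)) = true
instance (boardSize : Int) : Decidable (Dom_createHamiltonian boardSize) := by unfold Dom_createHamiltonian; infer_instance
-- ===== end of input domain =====

-- B replaces A's serpentine counter fill by a per-cell closed-form value; equivalent for boardSize ≥ 1 (A raises IndexError otherwise).

-- ===== PORT A =====
-- board[r][c] = v  (no-op when out of range; Pre_ keeps indices in range where Python would raise)
def pvSetCell (b : List (List Int)) (r c : Nat) (v : Int) : List (List Int) :=
  b.set r ((b.getD r []).set c v)

def createHamiltonian (boardSize : Int) : List (List Int) :=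
  -- Create Board Of All Zeroes
  let board0 : List (List Int) :=
    (PySem.List.pyRange 0 boardSize 1).foldl
      (fun b _ =>
        b ++ [(PySem.List.pyRange 0 boardSize 1).foldl (fun row _ => row ++ [(0 : Int)]) []]) []
  -- Top Left = 1  (Python raises IndexError here when boardSize ≤ 0; excluded by Pre_)
  let board1 := pvSetCell board0 0 0 1
  let n : Int := board1.length
  -- Looping through columns
  let st :=
    (PySem.List.pyRange 0 n 1).foldl
      (fun (st : List (List Int) × Int) i =>
        if PySem.Int.mod i 2 == 0 then
          (PySem.List.pyRange 1 n 1).foldl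
            (fun (st : List (List Int) × Int) j =>
              (pvSetCell st.1 j.toNat i.toNat st.2, st.2 + 1)) st
        else
          (PySem.List.pyRange (n - 1) 0 (-1)).foldl
            (fun (st : List (List Int) × Int) j =>
              (pvSetCell st.1 j.toNat i.toNat st.2, st.2 + 1)) st)
      (board1, 2)
  -- Increment the rest of the top row
  let m0 : Int := (st.1.getD 0 []).length
  ((PySem.List.pyRange (m0 - 1) 0 (-1)).foldl
      (fun (st : List (List Int) × Int) i =>
        (pvSetCell st.1 0 i.toNat st.2, st.2 + 1)) st).1

-- ===== PORT B =====
def createHamiltonian_alt (boardSize : Int) : List (List Int) :=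
  let n := boardSize
  (PySem.List.pyRange 0 n 1).map (fun r =>
    (PySem.List.pyRange 0 n 1).map (fun c =>
      if r == 0 then (if c == 0 then (1 : Int) else n * n - c + 1)
      else if PySem.Int.mod c 2 == 0 then 2 + c * (n - 1) + (r - 1)
      else 2 + c * (n - 1) + (n - 1 - r)))

-- ===== PRECONDITION & SPEC =====
-- A evaluates board[0][0] = 1 on the empty board when boardSize ≤ 0 and raises IndexError; only such inputs are excluded.
def Pre_createHamiltonian (boardSize : Int) : Prop := 1 ≤ boardSize
instance (boardSize : Int) : Decidable (Pre_createHamiltonian boardSize) := by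
  unfold Pre_createHamiltonian; infer_instance

def pvWitness_createHamiltonian : Int := 3

def Spec_createHamiltonian (boardSize : Int) (out : List (List Int)) : Prop :=
  out = createHamiltonian_alt boardSize
instance (boardSize : Int) (out : List (List Int)) : Decidable (Spec_createHamiltonian boardSize out) := by
  unfold Spec_createHamiltonian; infer_instance

-- ===== CLAIM (what is proved, stated in full; the proofs are below) =====
def Claim_equal_createHamiltonian : Prop :=
  ∀ (boardSize : Int), Dom_createHamiltonian boardSize → Pre_createHamiltonian boardSize →
    Spec_createHamiltonian boardSize (createHamiltonian boardSize)

-- ===== LEMMAS AND PROOFS =====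

-- proof-only helpers: the board as a write-list applied to the zero board
def pvGetCell (b : List (List Int)) (r c : Nat) : Int := (b.getD r []).getD c 0

def pvApply (b : List (List Int)) (w : Nat × Nat × Int) : List (List Int) :=
  pvSetCell b w.1 w.2.1 w.2.2

def pvApplyW (b : List (List Int)) (ws : List (Nat × Nat × Int)) : List (List Int) :=
  ws.foldl pvApply b

def pvShape (m : Nat) (b : List (List Int)) : Prop :=
  b.length = m ∧ ∀ row ∈ b, row.length = m

def pvColW (m i : Nat) : List (Nat × Nat × Int) :=
  if i % 2 = 0 then
    (List.range (m - 1)).map (fun k => (k + 1, i, (2 + (i : Int) * ((m : Int) - 1) + k : Int)))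
  else
    (List.range (m - 1)).map (fun k => (m - 1 - k, i, (2 + (i : Int) * ((m : Int) - 1) + k : Int)))

def pvTopW (m : Nat) : List (Nat × Nat × Int) :=
  (List.range (m - 1)).map (fun k => (0, m - 1 - k, (2 + (m : Int) * ((m : Int) - 1) + k : Int)))

def pvAllW (m : Nat) : List (Nat × Nat × Int) :=
  (0, 0, 1) :: ((List.range m).flatMap (pvColW m) ++ pvTopW m)

theorem pvApplyW_append (b : List (List Int)) (ws1 ws2 : List (Nat × Nat × Int)) :
    pvApplyW b (ws1 ++ ws2) = pvApplyW (pvApplyW b ws1) ws2 := by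
  simp [pvApplyW, List.foldl_append]

theorem pvGetD_set_ne {l : List Int} {i j : Nat} (h : i ≠ j) (a d : Int) :
    (l.set i a).getD j d = l.getD j d := by
  simp [List.getD_eq_getElem?_getD, List.getElem?_set_ne h]

theorem pvGetD_set_ne' {l : List (List Int)} {i j : Nat} (h : i ≠ j) (a : List Int)
    (d : List Int) : (l.set i a).getD j d = l.getD j d := by
  simp [List.getD_eq_getElem?_getD, List.getElem?_set_ne h]

theorem pvGetD_set_self {l : List Int} {i : Nat} (h : i < l.length) (a d : Int) :
    (l.set i a).getD i d = a := by
  simp [List.getD_eq_getElem?_getD, List.getElem?_set_self h]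

theorem pvGetD_set_self' {l : List (List Int)} {i : Nat} (h : i < l.length) (a d : List Int) :
    (l.set i a).getD i d = a := by
  simp [List.getD_eq_getElem?_getD, List.getElem?_set_self h]

theorem pvShape_apply {m : Nat} {b : List (List Int)} (h : pvShape m b) (w : Nat × Nat × Int) :
    pvShape m (pvApply b w) := by
  by_cases hw : w.1 < b.length
  · obtain ⟨hlen, hrow⟩ := h
    refine ⟨by simp [pvApply, pvSetCell, hlen], ?_⟩
    intro row hr
    rcases List.mem_or_eq_of_mem_set hr with hmem | heq
    · exact hrow _ hmem
    · subst heq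
      have hget : b.getD w.1 [] = b[w.1] := by
        simp [List.getD_eq_getElem?_getD, List.getElem?_eq_getElem hw]
      rw [hget]
      simp [hrow _ (List.getElem_mem hw)]
  · have hno : pvApply b w = b := by
      unfold pvApply pvSetCell
      exact List.set_eq_of_length_le (by omega)
    rwa [hno]

theorem pvGetCell_apply_ne {b : List (List Int)} {w : Nat × Nat × Int} {r c : Nat}
    (h : (w.1, w.2.1) ≠ (r, c)) : pvGetCell (pvApply b w) r c = pvGetCell b r c := by
  obtain ⟨wr, wc, wv⟩ := w
  simp only at h
  by_cases hrr : wr = r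
  · subst hrr
    have hcc : wc ≠ c := by intro hcc; exact h (by rw [hcc])
    by_cases hlt : wr < b.length
    · unfold pvGetCell pvApply pvSetCell
      rw [pvGetD_set_self' hlt, pvGetD_set_ne hcc]
    · unfold pvGetCell pvApply pvSetCell
      rw [List.set_eq_of_length_le (by omega)]
  · unfold pvGetCell pvApply pvSetCell
    rw [pvGetD_set_ne' hrr]

theorem pvGetCell_apply_self {m : Nat} {b : List (List Int)} (h : pvShape m b) {r c : Nat}
    {v : Int} (hr : r < m) (hc : c < m) : pvGetCell (pvApply b (r, c, v)) r c = v := by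
  obtain ⟨hlen, hrow⟩ := h
  have hr' : r < b.length := by omega
  have hget : b.getD r [] = b[r] := by
    simp [List.getD_eq_getElem?_getD, List.getElem?_eq_getElem hr']
  have hc' : c < (b.getD r []).length := by
    rw [hget, hrow _ (List.getElem_mem hr')]; exact hc
  unfold pvGetCell pvApply pvSetCell
  rw [pvGetD_set_self' hr', pvGetD_set_self hc']

theorem pvShape_applyW {m : Nat} {ws : List (Nat × Nat × Int)} :
    ∀ {b : List (List Int)}, pvShape m b → pvShape m (pvApplyW b ws) := by
  induction ws with
  | nil => intro b h; simpa [pvApplyW] using h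
  | cons w ws ih =>
      intro b h
      simpa [pvApplyW] using ih (pvShape_apply h w)

theorem pvGetCell_applyW_not_mem {ws : List (Nat × Nat × Int)} {r c : Nat} :
    ∀ {b : List (List Int)}, (∀ w ∈ ws, (w.1, w.2.1) ≠ (r, c)) →
      pvGetCell (pvApplyW b ws) r c = pvGetCell b r c := by
  induction ws with
  | nil => intro b _; simp [pvApplyW]
  | cons w ws ih =>
      intro b h
      have : pvGetCell (pvApplyW (pvApply b w) ws) r c = pvGetCell (pvApply b w) r c :=
        ih (fun u hu => h u (List.mem_cons_of_mem _ hu))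
      simpa [pvApplyW] using this.trans (pvGetCell_apply_ne (h w List.mem_cons_self))

theorem pvGetCell_applyW_hit {m : Nat} {ws : List (Nat × Nat × Int)} {w : Nat × Nat × Int} :
    ∀ {b : List (List Int)}, pvShape m b →
      (ws.map (fun u => (u.1, u.2.1))).Nodup → w ∈ ws → w.1 < m → w.2.1 < m →
      pvGetCell (pvApplyW b ws) w.1 w.2.1 = w.2.2 := by
  induction ws with
  | nil => intro b _ _ hw _ _; simp at hw
  | cons u ws ih =>
      intro b hsh hnd hw hr hc
      simp only [List.map_cons, List.nodup_cons] at hnd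
      rcases List.mem_cons.mp hw with heq | hmem
      · subst heq
        have hrest : ∀ u ∈ ws, (u.1, u.2.1) ≠ (w.1, w.2.1) := by
          intro u hu heq
          exact hnd.1 (heq ▸ List.mem_map_of_mem hu)
        have h1 : pvGetCell (pvApplyW (pvApply b w) ws) w.1 w.2.1
            = pvGetCell (pvApply b w) w.1 w.2.1 := pvGetCell_applyW_not_mem hrest
        have h2 : pvGetCell (pvApply b (w.1, w.2.1, w.2.2)) w.1 w.2.1 = w.2.2 :=
          pvGetCell_apply_self hsh hr hc
        simpa [pvApplyW] using h1.trans h2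
      · simpa [pvApplyW] using ih (pvShape_apply hsh u) hnd.2 hmem hr hc

-- one pass of a counter loop writing along a mapped range
theorem pvFoldl_writes (t : Nat) (g : Nat → Int) (P : Int → Nat × Nat)
    (b : List (List Int)) (cnt : Int) :
    ((List.range t).map g).foldl
      (fun (st : List (List Int) × Int) j => (pvSetCell st.1 (P j).1 (P j).2 st.2, st.2 + 1))
      (b, cnt)
    = (pvApplyW b ((List.range t).map (fun k => ((P (g k)).1, (P (g k)).2, cnt + k))), cnt + t) := by
  induction t with
  | zero => simp [pvApplyW]
  | succ t ih =>
      rw [List.range_succ]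
      simp only [List.map_append, List.foldl_append, ih, pvApplyW_append]
      simp only [List.map_cons, List.map_nil, List.foldl_cons, List.foldl_nil, pvApplyW, pvApply]
      refine Prod.ext rfl ?_
      push_cast; ring


theorem pvFoldl_writes_col (t : Nat) (g : Nat → Int) (col : Nat)
    (b : List (List Int)) (cnt : Int) :
    ((List.range t).map g).foldl
      (fun (st : List (List Int) × Int) j => (pvSetCell st.1 j.toNat col st.2, st.2 + 1)) (b, cnt)
    = (pvApplyW b ((List.range t).map (fun k => ((g k).toNat, col, cnt + k))), cnt + t) :=
  pvFoldl_writes t g (fun j => (j.toNat, col)) b cnt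

theorem pvFoldl_writes_top (t : Nat) (g : Nat → Int)
    (b : List (List Int)) (cnt : Int) :
    ((List.range t).map g).foldl
      (fun (st : List (List Int) × Int) j => (pvSetCell st.1 0 j.toNat st.2, st.2 + 1)) (b, cnt)
    = (pvApplyW b ((List.range t).map (fun k => (0, (g k).toNat, cnt + k))), cnt + t) :=
  pvFoldl_writes t g (fun j => (0, j.toNat)) b cnt

theorem pvMod_two_cast (p : Nat) : PySem.Int.mod (p : Int) 2 = ((p % 2 : Nat) : Int) := by
  exact_mod_cast PySem.Int.mod_natCast p 2

theorem pvCols (m : Nat) (hm : 1 ≤ m) (b : List (List Int)) :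
    ∀ p, p ≤ m →
      ((List.range p).map (fun k => ((k : Nat) : Int))).foldl
        (fun (st : List (List Int) × Int) i =>
          if PySem.Int.mod i 2 == 0 then
            (PySem.List.pyRange 1 (m : Int) 1).foldl
              (fun (st : List (List Int) × Int) j =>
                (pvSetCell st.1 j.toNat i.toNat st.2, st.2 + 1)) st
          else
            (PySem.List.pyRange ((m : Int) - 1) 0 (-1)).foldl
              (fun (st : List (List Int) × Int) j =>
                (pvSetCell st.1 j.toNat i.toNat st.2, st.2 + 1)) st)
        (b, 2)
      = (pvApplyW b ((List.range p).flatMap (pvColW m)), 2 + p * ((m : Int) - 1)) := by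
  intro p
  induction p with
  | zero => intro _; simp [pvApplyW]
  | succ p ih =>
      intro hp
      rw [List.range_succ, List.map_append, List.foldl_append, ih (by omega)]
      simp only [List.map_cons, List.map_nil, List.foldl_cons, List.foldl_nil]
      have hflat : List.flatMap (pvColW m) (List.range p ++ [p])
          = (List.range p).flatMap (pvColW m) ++ pvColW m p := by
        rw [List.flatMap_append]; simp
      rw [hflat, pvApplyW_append]
      have hcnt : ((m - 1 : Nat) : Int) = (m : Int) - 1 := by omega
      by_cases hpar : p % 2 = 0
      · have hcond : (PySem.Int.mod ((p : Nat) : Int) 2 == 0) = true := by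
          rw [pvMod_two_cast, hpar]; rfl
        rw [if_pos hcond]
        have h1 : PySem.List.pyRange 1 (m : Int) 1
            = (List.range (m - 1)).map (fun k : Nat => 1 + (k : Int)) := by
          rw [PySem.List.pyRange_one]
          have : ((m : Int) - 1).toNat = m - 1 := by omega
          rw [this]
        rw [h1, pvFoldl_writes_col]
        have h2 : (List.range (m - 1)).map
              (fun k : Nat => (((1 : Int) + (k : Int)).toNat, ((p : Nat) : Int).toNat,
                2 + (p : Int) * ((m : Int) - 1) + (k : Int)))
            = pvColW m p := by
          rw [pvColW, if_pos hpar]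
          apply List.map_congr_left
          intro k _
          have : ((1 : Int) + (k : Int)).toNat = k + 1 := by omega
          simp [this]
        rw [h2]
        refine Prod.ext rfl ?_
        simp only []
        rw [hcnt]
        push_cast
        ring
      · have hcond : (PySem.Int.mod ((p : Nat) : Int) 2 == 0) = false := by
          rw [pvMod_two_cast]
          have : p % 2 = 1 := by omega
          rw [this]
          rfl
        rw [if_neg (by rw [hcond]; exact Bool.false_ne_true)]
        have h1 : PySem.List.pyRange ((m : Int) - 1) 0 (-1)
            = (List.range (m - 1)).map (fun k : Nat => (m : Int) - 1 - (k : Int)) := by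
          rw [PySem.List.pyRange_neg_one]
          have : ((m : Int) - 1 - 0).toNat = m - 1 := by omega
          rw [this]
        rw [h1, pvFoldl_writes_col]
        have h2 : (List.range (m - 1)).map
              (fun k : Nat => (((m : Int) - 1 - (k : Int)).toNat, ((p : Nat) : Int).toNat,
                2 + (p : Int) * ((m : Int) - 1) + (k : Int)))
            = pvColW m p := by
          rw [pvColW, if_neg hpar]
          apply List.map_congr_left
          intro k hk
          have hk' : k < m - 1 := List.mem_range.mp hk
          have : ((m : Int) - 1 - (k : Int)).toNat = m - 1 - k := by omega
          simp [this]
        rw [h2]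
        refine Prod.ext rfl ?_
        simp only []
        rw [hcnt]
        push_cast
        ring

theorem pvColW_pos {m i : Nat} {q : Nat × Nat}
    (hq : q ∈ (pvColW m i).map (fun w => (w.1, w.2.1))) :
    q.2 = i ∧ 1 ≤ q.1 ∧ q.1 ≤ m - 1 := by
  rw [pvColW] at hq
  by_cases hpar : i % 2 = 0
  · rw [if_pos hpar] at hq
    simp only [List.map_map, List.mem_map, Function.comp] at hq
    obtain ⟨k, hk, rfl⟩ := hq
    have := List.mem_range.mp hk
    exact ⟨rfl, by omega, by omega⟩
  · rw [if_neg hpar] at hq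
    simp only [List.map_map, List.mem_map, Function.comp] at hq
    obtain ⟨k, hk, rfl⟩ := hq
    have := List.mem_range.mp hk
    exact ⟨rfl, by omega, by omega⟩

theorem pvColW_nodup (m i : Nat) : ((pvColW m i).map (fun w => (w.1, w.2.1))).Nodup := by
  rw [pvColW]
  by_cases hpar : i % 2 = 0
  · rw [if_pos hpar]
    simp only [List.map_map]
    exact List.Nodup.map_on
      (fun x hx y hy h => by
        simp only [Function.comp_apply, Prod.mk.injEq] at h
        omega)
      (List.nodup_range)
  · rw [if_neg hpar]
    simp only [List.map_map]
    exact List.Nodup.map_on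
      (fun x hx y hy h => by
        simp only [Function.comp_apply, Prod.mk.injEq] at h
        have hx' := List.mem_range.mp hx
        have hy' := List.mem_range.mp hy
        omega)
      (List.nodup_range)

theorem pvTopW_pos {m : Nat} {q : Nat × Nat}
    (hq : q ∈ (pvTopW m).map (fun w => (w.1, w.2.1))) :
    q.1 = 0 ∧ 1 ≤ q.2 ∧ q.2 ≤ m - 1 := by
  rw [pvTopW] at hq
  simp only [List.map_map, List.mem_map, Function.comp] at hq
  obtain ⟨k, hk, rfl⟩ := hq
  have := List.mem_range.mp hk
  exact ⟨rfl, by omega, by omega⟩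

theorem pvAllW_pos_nodup (m : Nat) : ((pvAllW m).map (fun w => (w.1, w.2.1))).Nodup := by
  rw [pvAllW]
  simp only [List.map_cons, List.map_append, List.nodup_cons]
  constructor
  · intro hmem
    rw [List.mem_append] at hmem
    rcases hmem with hmem | hmem
    · rw [List.map_flatMap, List.mem_flatMap] at hmem
      obtain ⟨i, _, hmem⟩ := hmem
      have := pvColW_pos hmem
      omega
    · have := pvTopW_pos hmem
      omega
  · refine List.Nodup.append ?_ ?_ ?_
    · rw [List.map_flatMap]
      rw [List.nodup_flatMap]
      refine ⟨fun i _ => pvColW_nodup m i, ?_⟩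
      refine List.Pairwise.imp ?_ (List.nodup_range)
      intro i j hij q hqi hqj
      have h1 := (pvColW_pos hqi).1
      have h2 := (pvColW_pos hqj).1
      exact hij (h1 ▸ h2 ▸ rfl)
    · rw [pvTopW]
      simp only [List.map_map]
      exact List.Nodup.map_on
        (fun x hx y hy h => by
          simp only [Function.comp_apply, Prod.mk.injEq] at h
          have hx' := List.mem_range.mp hx
          have hy' := List.mem_range.mp hy
          omega)
        (List.nodup_range)
    · intro q hq1 hq2
      rw [List.map_flatMap, List.mem_flatMap] at hq1
      obtain ⟨i, _, hq1⟩ := hq1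
      have := pvColW_pos hq1
      have := pvTopW_pos hq2
      omega

theorem pvGetCell_eq {b : List (List Int)} {r c : Nat} (h1 : r < b.length)
    (h2 : c < (b[r]'h1).length) : pvGetCell b r c = (b[r]'h1)[c]'h2 := by
  have hrow : b.getD r [] = b[r]'h1 := by
    rw [List.getD_eq_getElem?_getD, List.getElem?_eq_getElem h1]; rfl
  unfold pvGetCell
  rw [hrow, List.getD_eq_getElem?_getD, List.getElem?_eq_getElem h2]; rfl

theorem pvA_eq (m : Nat) (hm : 1 ≤ m) :
    createHamiltonian (m : Int)
      = pvApplyW (List.replicate m (List.replicate m 0)) (pvAllW m) := by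
  have hlenR : (PySem.List.pyRange 0 (m : Int) 1).length = m := by
    rw [PySem.List.length_pyRange_one]; omega
  have hin : (PySem.List.pyRange 0 (m : Int) 1).foldl
      (fun row _ => row ++ [(0 : Int)]) [] = List.replicate m (0 : Int) := by
    have h := PySem.List.foldl_append_singleton_eq_map (fun _ => (0 : Int))
      (PySem.List.pyRange 0 (m : Int) 1) []
    exact h.trans (by rw [List.map_const', hlenR]; simp)
  have hzero : (PySem.List.pyRange 0 (m : Int) 1).foldl
      (fun (b : List (List Int)) _ =>
        b ++ [(PySem.List.pyRange 0 (m : Int) 1).foldl (fun row _ => row ++ [(0 : Int)]) []]) []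
      = List.replicate m (List.replicate m (0 : Int)) := by
    have h := PySem.List.foldl_append_singleton_eq_map
      (fun _ => (PySem.List.pyRange 0 (m : Int) 1).foldl (fun row _ => row ++ [(0 : Int)]) [])
      (PySem.List.pyRange 0 (m : Int) 1) []
    refine h.trans ?_
    rw [hin, List.map_const', hlenR]
    simp
  have houter : PySem.List.pyRange 0 (m : Int) 1
      = (List.range m).map (fun k : Nat => (k : Int)) := by
    rw [PySem.List.pyRange_one]
    have : ((m : Int) - 0).toNat = m := by omega
    rw [this]
    simp
  have hshape0 : pvShape m (List.replicate m (List.replicate m (0 : Int))) :=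
    ⟨by simp, fun row hr => by rw [List.eq_of_mem_replicate hr]; simp⟩
  have hb1 : pvSetCell (List.replicate m (List.replicate m (0 : Int))) 0 0 1
      = pvApply (List.replicate m (List.replicate m (0 : Int))) (0, 0, 1) := rfl
  have hshape1 : pvShape m (pvApply (List.replicate m (List.replicate m (0 : Int))) (0, 0, 1)) :=
    pvShape_apply hshape0 _
  have hlen1 : ((pvSetCell (List.replicate m (List.replicate m (0 : Int))) 0 0 1).length : Int)
      = (m : Int) := by rw [hb1, hshape1.1]
  simp only [createHamiltonian]
  simp only [hzero]
  simp only [hlen1]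
  simp only [hb1]
  rw [houter, pvCols m hm _ m le_rfl]
  set B1 := pvApply (List.replicate m (List.replicate m (0 : Int))) (0, 0, 1) with hB1
  have hshapeC : pvShape m (pvApplyW B1 ((List.range m).flatMap (pvColW m))) :=
    pvShape_applyW hshape1
  have hrow0 : (((pvApplyW B1 ((List.range m).flatMap (pvColW m))).getD 0 []).length : Int)
      = (m : Int) := by
    have h0 : 0 < (pvApplyW B1 ((List.range m).flatMap (pvColW m))).length := by
      rw [hshapeC.1]; omega
    have : (pvApplyW B1 ((List.range m).flatMap (pvColW m))).getD 0 []
        = (pvApplyW B1 ((List.range m).flatMap (pvColW m)))[0] := by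
      simp [List.getD_eq_getElem?_getD, List.getElem?_eq_getElem h0]
    rw [this, hshapeC.2 _ (List.getElem_mem h0)]
  simp only [hrow0]
  have htopr : PySem.List.pyRange ((m : Int) - 1) 0 (-1)
      = (List.range (m - 1)).map (fun k : Nat => (m : Int) - 1 - (k : Int)) := by
    rw [PySem.List.pyRange_neg_one]
    have : ((m : Int) - 1 - 0).toNat = m - 1 := by omega
    rw [this]
  rw [htopr, pvFoldl_writes_top]
  have htw : (List.range (m - 1)).map
        (fun k : Nat => ((0 : Nat), ((m : Int) - 1 - (k : Int)).toNat,
          2 + (m : Int) * ((m : Int) - 1) + (k : Int)))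
      = pvTopW m := by
    rw [pvTopW]
    apply List.map_congr_left
    intro k hk
    have hk' : k < m - 1 := List.mem_range.mp hk
    have : ((m : Int) - 1 - (k : Int)).toNat = m - 1 - k := by omega
    simp [this]
  rw [htw]
  show pvApplyW (pvApplyW B1 ((List.range m).flatMap (pvColW m))) (pvTopW m) = _
  rw [← pvApplyW_append]
  rfl

theorem pvB_eq (m : Nat) :
    createHamiltonian_alt (m : Int)
      = (List.range m).map (fun r : Nat => (List.range m).map (fun c : Nat =>
          if ((r : Int) == 0) then (if ((c : Int) == 0) then (1 : Int)
            else (m : Int) * (m : Int) - (c : Int) + 1)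
          else if (PySem.Int.mod (c : Int) 2 == 0) then
            2 + (c : Int) * ((m : Int) - 1) + ((r : Int) - 1)
          else 2 + (c : Int) * ((m : Int) - 1) + ((m : Int) - 1 - (r : Int)))) := by
  have houter : PySem.List.pyRange 0 (m : Int) 1
      = (List.range m).map (fun k : Nat => (k : Int)) := by
    rw [PySem.List.pyRange_one]
    have : ((m : Int) - 0).toNat = m := by omega
    rw [this]
    simp
  simp only [createHamiltonian_alt, houter, List.map_map]
  rfl

-- ===== VERDICT (by name: the statement is the Claim_ definition above) =====
theorem createHamiltonian_spec : Claim_equal_createHamiltonian := by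
  unfold Claim_equal_createHamiltonian
  intro n _ hpre
  unfold Pre_createHamiltonian at hpre
  unfold Spec_createHamiltonian
  obtain ⟨m, hm, rfl⟩ : ∃ m : Nat, 1 ≤ m ∧ n = (m : Int) := ⟨n.toNat, by omega, by omega⟩
  rw [pvA_eq m hm, pvB_eq m]
  have hz : pvShape m (List.replicate m (List.replicate m (0 : Int))) :=
    ⟨by simp, fun row hrw => by rw [List.eq_of_mem_replicate hrw]; simp⟩
  have hsh : pvShape m (pvApplyW (List.replicate m (List.replicate m (0 : Int))) (pvAllW m)) :=
    pvShape_applyW hz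
  have hnd := pvAllW_pos_nodup m
  apply List.ext_getElem (by simp [hsh.1])
  intro r h1 h2
  have hr : r < m := by simpa using h2
  have hrowlen : ((pvApplyW (List.replicate m (List.replicate m (0 : Int))) (pvAllW m))[r]'h1).length = m :=
    hsh.2 _ (List.getElem_mem h1)
  apply List.ext_getElem (by rw [hrowlen]; simp)
  intro c hc1 hc2
  have hc : c < m := by rw [hrowlen] at hc1; exact hc1
  rw [← pvGetCell_eq h1 hc1]
  simp only [List.getElem_map, List.getElem_range]
  by_cases hr0 : r = 0
  · subst hr0
    by_cases hc0 : c = 0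
    · subst hc0
      have hval := pvGetCell_applyW_hit (w := ((0 : Nat), (0 : Nat), (1 : Int))) hz hnd
        (List.mem_cons_self) (by omega) (by omega)
      simpa using hval
    · have hk : m - 1 - c < m - 1 := by omega
      have hwtop : ((0 : Nat), c, 2 + (m : Int) * ((m : Int) - 1) + ((m - 1 - c : Nat) : Int))
          ∈ pvTopW m := by
        rw [pvTopW]
        refine List.mem_map.mpr ⟨m - 1 - c, List.mem_range.mpr hk, ?_⟩
        have : m - 1 - (m - 1 - c) = c := by omega
        rw [this]
      have hwall : ((0 : Nat), c, 2 + (m : Int) * ((m : Int) - 1) + ((m - 1 - c : Nat) : Int))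
          ∈ pvAllW m := by
        rw [pvAllW]
        exact List.mem_cons_of_mem _ (List.mem_append_right _ hwtop)
      have hval := pvGetCell_applyW_hit hz hnd hwall (by omega) (by simpa using hc)
      simp only at hval
      rw [hval]
      have hcast : (((m - 1 - c : Nat)) : Int) = (m : Int) - 1 - (c : Int) := by omega
      have hcne : (((c : Nat) : Int) == 0) = false := by
        simp [beq_eq_false_iff_ne]
        omega
      rw [hcast]
      simp only [Nat.cast_zero, beq_self_eq_true, if_true, hcne, Bool.false_eq_true, if_false]
      ring
  · have hrne : (((r : Nat) : Int) == 0) = false := by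
      simp [beq_eq_false_iff_ne]
      omega
    have hm2 : 2 ≤ m := by omega
    by_cases hpar : c % 2 = 0
    · have hwcol : (r, c, 2 + (c : Int) * ((m : Int) - 1) + ((r - 1 : Nat) : Int))
          ∈ pvColW m c := by
        rw [pvColW, if_pos hpar]
        refine List.mem_map.mpr ⟨r - 1, List.mem_range.mpr (by omega), ?_⟩
        have : r - 1 + 1 = r := by omega
        rw [this]
      have hwall : (r, c, 2 + (c : Int) * ((m : Int) - 1) + ((r - 1 : Nat) : Int))
          ∈ pvAllW m := by
        rw [pvAllW]
        exact List.mem_cons_of_mem _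
          (List.mem_append_left _ (List.mem_flatMap.mpr ⟨c, List.mem_range.mpr hc, hwcol⟩))
      have hval := pvGetCell_applyW_hit hz hnd hwall (by simpa using hr) (by simpa using hc)
      simp only at hval
      rw [hval]
      have hmod : (PySem.Int.mod ((c : Nat) : Int) 2 == 0) = true := by
        rw [pvMod_two_cast, hpar]; rfl
      rw [hrne]
      simp only [Bool.false_eq_true, if_false, hmod, if_true]
      have hcast : (((r - 1 : Nat)) : Int) = (r : Int) - 1 := by omega
      rw [hcast]
    · have hwcol : (r, c, 2 + (c : Int) * ((m : Int) - 1) + ((m - 1 - r : Nat) : Int))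
          ∈ pvColW m c := by
        rw [pvColW, if_neg hpar]
        refine List.mem_map.mpr ⟨m - 1 - r, List.mem_range.mpr (by omega), ?_⟩
        have : m - 1 - (m - 1 - r) = r := by omega
        rw [this]
      have hwall : (r, c, 2 + (c : Int) * ((m : Int) - 1) + ((m - 1 - r : Nat) : Int))
          ∈ pvAllW m := by
        rw [pvAllW]
        exact List.mem_cons_of_mem _
          (List.mem_append_left _ (List.mem_flatMap.mpr ⟨c, List.mem_range.mpr hc, hwcol⟩))
      have hval := pvGetCell_applyW_hit hz hnd hwall (by simpa using hr) (by simpa using hc)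
      simp only at hval
      rw [hval]
      have hmod : (PySem.Int.mod ((c : Nat) : Int) 2 == 0) = false := by
        rw [pvMod_two_cast]
        have : c % 2 = 1 := by omega
        rw [this]; rfl
      rw [hrne]
      simp only [Bool.false_eq_true, if_false, hmod]
      have hcast : (((m - 1 - r : Nat)) : Int) = (m : Int) - 1 - (r : Int) := by omega
      rw [hcast]
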